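-- pv_equiv track=rewrite | github.com/Krishn1101/Problems-on-Python | Leftmost_And_Rightmost_Index.py | indexes
-- ===== SOURCE A (Python) =====
-- def indexes(v, x):
--     one, two = -1, -1
--     for i in range(len(v)):
--         if v[i] == x:
--             if one == -1:
--                 one = i
--             two = i
--     return (one, two)
-- ===== SOURCE B (Python) =====
-- def indexes(v, x):
--     left = -1
--     for i in range(len(v)):
--         if v[i] == x:
--             left = i
--             break
--     right = -1
--     for i in range(len(v) - 1, -1, -1):
--         if v[i] == x:
--             right = i
--             break
--     return (left, right)
-- ===== Notes on version B (the rewrite author's own statement) =====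
-- stated objective: alternative
-- what changed: Replaces the single full pass that maintains both indices with two early-terminating scans: a forward scan that breaks at the first match (leftmost) and a backward scan from the end that breaks at the first match (rightmost).
import Mathlib
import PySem

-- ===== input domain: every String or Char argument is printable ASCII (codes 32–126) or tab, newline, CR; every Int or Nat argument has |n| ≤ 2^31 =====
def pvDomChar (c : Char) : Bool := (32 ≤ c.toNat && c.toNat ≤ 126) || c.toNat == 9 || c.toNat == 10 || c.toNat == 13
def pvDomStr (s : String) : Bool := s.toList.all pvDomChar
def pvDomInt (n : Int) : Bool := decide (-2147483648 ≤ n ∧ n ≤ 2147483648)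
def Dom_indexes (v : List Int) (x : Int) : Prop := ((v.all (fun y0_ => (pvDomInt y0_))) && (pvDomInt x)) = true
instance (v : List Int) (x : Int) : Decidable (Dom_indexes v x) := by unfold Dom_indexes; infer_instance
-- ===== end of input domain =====

-- ===== PORT A =====
-- B replaces A's single accumulate-both pass by a forward break-on-first-match scan and a
-- backward break-on-first-match scan (alternative decomposition; same worst-case cost).
def indexes (v : List Int) (x : Int) : Int × Int :=
  (List.range v.length).foldl
    (fun (s : Int × Int) (i : Nat) =>
      if v.getD i 0 = x then
        (if s.1 = -1 then ((i : Int), (i : Int)) else (s.1, (i : Int)))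
      else s)
    (-1, -1)

-- ===== PORT B =====
-- forward loop with break: first match index from the front, -1 if none
def findL (x : Int) : List Int → Nat → Int
  | [], _ => -1
  | a :: t, i => if a = x then (i : Int) else findL x t (i + 1)

-- backward loop "for i in range(len(v)-1,-1,-1): break on match": n counts remaining indices
def findR (v : List Int) (x : Int) : Nat → Int
  | 0 => -1
  | n + 1 => if v.getD n 0 = x then (n : Int) else findR v x n

def indexes_alt (v : List Int) (x : Int) : Int × Int :=
  (findL x v 0, findR v x v.length)

-- ===== PRECONDITION & SPEC =====
def Spec_indexes (v : List Int) (x : Int) (out : Int × Int) : Prop := out = indexes_alt v x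
instance (v : List Int) (x : Int) (out : Int × Int) : Decidable (Spec_indexes v x out) := by unfold Spec_indexes; infer_instance

-- ===== CLAIM (what is proved, stated in full; the proofs are below) =====
def Claim_equal_indexes : Prop := ∀ (v : List Int) (x : Int), Dom_indexes v x → Spec_indexes v x (indexes v x)

-- ===== LEMMAS AND PROOFS =====

-- ===== VERDICT (by name: the statement is the Claim_ definition above) =====
theorem findL_append (x : Int) (a : Int) : ∀ (l : List Int) (i : Nat),
    findL x (l ++ [a]) i =
      if findL x l i = -1 then (if a = x then ((i + l.length : Nat) : Int) else -1)
      else findL x l i := by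
  intro l
  induction l with
  | nil => intro i; simp [findL]
  | cons b t ih =>
    intro i
    by_cases hb : b = x
    · have : ((i : Int)) ≠ -1 := by omega
      simp [findL, hb, this]
    · simp only [List.cons_append, findL, if_neg hb]
      rw [ih (i + 1)]
      have : i + 1 + t.length = i + (t.length + 1) := by omega
      simp [this]

theorem indexes_inv (v : List Int) (x : Int) : ∀ n, n ≤ v.length →
    (List.range n).foldl
      (fun (s : Int × Int) (i : Nat) =>
        if v.getD i 0 = x then
          (if s.1 = -1 then ((i : Int), (i : Int)) else (s.1, (i : Int)))
        else s)
      (-1, -1) = (findL x (v.take n) 0, findR v x n) := by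
  intro n
  induction n with
  | zero => intro _; simp [findL, findR]
  | succ n ih =>
    intro hn
    have hn' : n ≤ v.length := by omega
    have hlt : n < v.length := by omega
    rw [List.range_succ, List.foldl_append, ih hn']
    have htake : v.take (n + 1) = v.take n ++ [v.getD n 0] := by
      rw [List.take_succ]
      simp [List.getElem?_eq_getElem hlt, List.getD, List.getElem?_eq_getElem hlt]
    have hf := findL_append x (v.getD n 0) (v.take n) 0
    have hlen : (v.take n).length = n := by simp [hn']
    simp only [List.foldl_cons, List.foldl_nil, findR, htake, hf, hlen]
    by_cases hm : v[n]?.getD 0 = x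
    · by_cases h1 : findL x (v.take n) 0 = -1 <;> simp [List.getD, hm, h1]
    · simp [List.getD, hm]

theorem indexes_spec : Claim_equal_indexes := by
  intro v x _
  unfold Spec_indexes indexes indexes_alt
  rw [indexes_inv v x v.length le_rfl]
  simp
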